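-- pv_equiv track=rewrite | github.com/ASharma1406/ProdGuard_PLC_-_Decline_Risk_Monitoring | code/PLC_prediction_and_Decline_Analysis.py | consecutive_negative_growth
-- ===== SOURCE A (Python) =====
-- def consecutive_negative_growth(series):
--     count = 0
--     result = []
--     for val in series:
--         if val < 0:
--             count += 1
--         else:
--             count = 0
--         result.append(count)
--     return result
-- ===== SOURCE B (Python) =====
-- def consecutive_negative_growth(series):
--     # run-based: split into maximal same-sign runs, enumerate within negative runs
--     out = []
--     rest = list(series)
--     while rest:
--         n = 0
--         if rest[0] < 0:
--             while n < len(rest) and rest[n] < 0: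
--                 n += 1
--             out.extend(range(1, n + 1))
--         else:
--             while n < len(rest) and rest[n] >= 0:
--                 n += 1
--             out.extend([0] * n)
--         rest = rest[n:]
--     return out
-- ===== Notes on version B (the rewrite author's own statement) =====
-- stated objective: alternative
-- what changed: Replaces the element-by-element reset-counter scan with a run decomposition: the series is split into maximal negative / non-negative runs, each negative run contributes range(1, len+1) and each non-negative run a block of zeros.
import Mathlib
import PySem

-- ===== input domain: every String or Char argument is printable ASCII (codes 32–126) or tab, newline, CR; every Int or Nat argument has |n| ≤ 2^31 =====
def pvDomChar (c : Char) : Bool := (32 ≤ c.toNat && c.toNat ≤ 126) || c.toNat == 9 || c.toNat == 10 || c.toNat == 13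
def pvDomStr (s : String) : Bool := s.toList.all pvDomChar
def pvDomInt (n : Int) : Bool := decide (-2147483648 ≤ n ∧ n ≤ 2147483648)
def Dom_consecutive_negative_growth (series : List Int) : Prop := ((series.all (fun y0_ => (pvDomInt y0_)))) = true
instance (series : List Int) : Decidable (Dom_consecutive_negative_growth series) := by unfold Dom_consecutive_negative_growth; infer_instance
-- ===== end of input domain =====

-- B replaces A's element-by-element reset-counter scan with a run decomposition (alternative, same cost).

-- ===== PORT A =====
def consecutive_negative_growth (series : List Int) : List Int :=
  (series.foldl (fun (st : Int × List Int) val =>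
      let count := if val < 0 then st.1 + 1 else (0 : Int)
      (count, st.2 ++ [count])) (0, [])).2

-- ===== PORT B =====
def consecutive_negative_growth_alt (series : List Int) : List Int :=
  match series with
  | [] => []
  | x :: xs =>
    if x < 0 then
      let run := (x :: xs).takeWhile (fun v => decide (v < 0))
      ((List.range run.length).map (fun k : Nat => ((k : Int) + 1)))
        ++ consecutive_negative_growth_alt ((x :: xs).dropWhile (fun v => decide (v < 0)))
    else
      let run := (x :: xs).takeWhile (fun v => decide (0 ≤ v))
      (List.replicate run.length (0 : Int))
        ++ consecutive_negative_growth_alt ((x :: xs).dropWhile (fun v => decide (0 ≤ v)))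
termination_by series.length
decreasing_by
  · simp only [List.dropWhile_cons]
    have := List.length_dropWhile_le (fun v => decide (v < 0)) xs
    simp_all
  · simp only [List.dropWhile_cons]
    have := List.length_dropWhile_le (fun v => decide (0 ≤ v)) xs
    have hx : (0:Int) ≤ x := by omega
    simp_all

-- ===== PRECONDITION & SPEC =====
def Spec_consecutive_negative_growth (series : List Int) (out : List Int) : Prop := out = consecutive_negative_growth_alt series
instance (series : List Int) (out : List Int) : Decidable (Spec_consecutive_negative_growth series out) := by unfold Spec_consecutive_negative_growth; infer_instance

-- ===== CLAIM (what is proved, stated in full; the proofs are below) =====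
def Claim_equal_consecutive_negative_growth : Prop := ∀ (series : List Int), Dom_consecutive_negative_growth series → Spec_consecutive_negative_growth series (consecutive_negative_growth series)

-- ===== LEMMAS AND PROOFS =====

/-- A's loop as a structural recursion carrying the running count. -/
def cngA (c : Int) : List Int → List Int
  | [] => []
  | v :: vs =>
    let c' := if v < 0 then c + 1 else 0
    c' :: cngA c' vs

theorem cngA_foldl (s : List Int) : ∀ (c : Int) (acc : List Int),
    (s.foldl (fun (st : Int × List Int) val =>
      let count := if val < 0 then st.1 + 1 else (0 : Int)
      (count, st.2 ++ [count])) (c, acc)).2 = acc ++ cngA c s := by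
  induction s with
  | nil => simp [cngA]
  | cons v vs ih =>
    intro c acc
    simp only [List.foldl_cons, cngA]
    rw [ih]
    simp

/-- A's recursion across a negative prefix. -/
theorem cngA_neg_run (s : List Int) : ∀ (c : Int),
    cngA c s = ((List.range (s.takeWhile (fun v => decide (v < 0))).length).map
        (fun k : Nat => ((k : Int) + c + 1)))
      ++ cngA 0 (s.dropWhile (fun v => decide (v < 0))) := by
  induction s with
  | nil => simp [cngA]
  | cons v vs ih =>
    intro c
    by_cases hv : v < 0
    · rw [List.takeWhile_cons_of_pos (by simpa using hv),
        List.dropWhile_cons_of_pos (by simpa using hv),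
        show cngA c (v :: vs) = (c + 1) :: cngA (c + 1) vs from by simp [cngA, hv]]
      rw [ih (c + 1), List.length_cons, List.range_succ_eq_map]
      simp only [List.map_cons, List.map_map, List.cons_append, Nat.cast_zero]
      congr 1
      · ring
      congr 1
      apply List.map_congr_left
      intro k _
      simp [Function.comp]
      ring
    · rw [List.takeWhile_cons_of_neg (by simpa using hv),
        List.dropWhile_cons_of_neg (by simpa using hv)]
      simp [cngA, hv]

/-- A's recursion (from count 0) across a non-negative prefix. -/
theorem cngA_nonneg_run (s : List Int) :
    cngA 0 s = (List.replicate (s.takeWhile (fun v => decide (0 ≤ v))).length (0 : Int))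
      ++ cngA 0 (s.dropWhile (fun v => decide (0 ≤ v))) := by
  induction s with
  | nil => simp [cngA]
  | cons v vs ih =>
    by_cases hv : (0 : Int) ≤ v
    · have hv' : ¬ v < 0 := by omega
      simp [cngA, List.takeWhile_cons, List.dropWhile_cons, hv, hv', List.replicate_succ, ih]
    · simp [List.takeWhile_cons, hv]

theorem cngA_eq_alt (s : List Int) : cngA 0 s = consecutive_negative_growth_alt s := by
  induction s using consecutive_negative_growth_alt.induct with
  | case1 => simp [cngA, consecutive_negative_growth_alt]
  | case2 x xs hx ih =>
    rw [consecutive_negative_growth_alt, if_pos hx, cngA_neg_run, ih]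
    simp
  | case3 x xs hx ih =>
    have hx' : (0 : Int) ≤ x := by omega
    rw [consecutive_negative_growth_alt, if_neg hx, cngA_nonneg_run, ih]

-- ===== VERDICT (by name: the statement is the Claim_ definition above) =====
theorem consecutive_negative_growth_spec : Claim_equal_consecutive_negative_growth := by
  intro series _
  unfold Spec_consecutive_negative_growth consecutive_negative_growth
  rw [cngA_foldl, ← cngA_eq_alt]
  simp
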